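-- pv_equiv track=rewrite | github.com/AnaClaraZoppiSerpa/GAMDS | helpers/countsHelper.py | _poly_xor_cost
-- ===== SOURCE A (Python) =====
-- def _poly_xor_cost(poly, ORDER):
--     mask = 1
--     set_bits = 0
--     current_bit = 0
--     while current_bit < ORDER:
--         if (poly & mask) != 0:
--             set_bits += 1
--         mask = mask << 1
--         current_bit += 1
--     return set_bits - 1
-- ===== SOURCE B (Python) =====
-- def _poly_xor_cost(poly, ORDER):
--     # Mask poly to its low ORDER bits (empty mask when ORDER <= 0),
--     # then count set bits with Kernighan's loop: one iteration per set bit.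
--     n = poly & ((1 << ORDER) - 1) if ORDER > 0 else 0
--     count = 0
--     while n:
--         n &= n - 1
--         count += 1
--     return count - 1
-- ===== Notes on version B (the rewrite author's own statement) =====
-- stated objective: faster
-- what changed: A scans every bit position 0..ORDER-1 with a growing mask; B masks poly to its low ORDER bits once and runs Brian Kernighan's loop (n &= n-1), iterating once per set bit instead of once per bit position.
import Mathlib
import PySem

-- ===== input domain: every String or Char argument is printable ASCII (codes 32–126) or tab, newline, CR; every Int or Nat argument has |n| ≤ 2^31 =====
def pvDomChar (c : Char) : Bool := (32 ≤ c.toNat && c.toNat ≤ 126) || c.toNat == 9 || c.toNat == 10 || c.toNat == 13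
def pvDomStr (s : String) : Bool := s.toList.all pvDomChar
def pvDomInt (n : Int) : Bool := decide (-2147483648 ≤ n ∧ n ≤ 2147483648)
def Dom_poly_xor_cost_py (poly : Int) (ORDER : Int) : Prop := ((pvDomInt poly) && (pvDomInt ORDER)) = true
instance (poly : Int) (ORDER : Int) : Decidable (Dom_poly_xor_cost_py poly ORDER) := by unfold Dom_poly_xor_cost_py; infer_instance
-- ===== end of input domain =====

-- B replaces A's per-position mask scan by a single mask plus Kernighan's loop over set bits (alternative algorithm; return values proved equal).

-- ===== PORT A =====
-- the while loop: state (mask, set_bits, current_bit)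
def pvALoop (poly ORDER mask set_bits current_bit : Int) : Int :=
  if current_bit < ORDER then
    pvALoop poly ORDER (mask <<< (1 : Nat))
      (if PySem.Int.band poly mask ≠ 0 then set_bits + 1 else set_bits)
      (current_bit + 1)
  else set_bits - 1
termination_by (ORDER - current_bit).toNat
decreasing_by omega

def poly_xor_cost_py (poly : Int) (ORDER : Int) : Int :=
  pvALoop poly ORDER 1 0 0

-- ===== PORT B =====
-- Source B's while loop; its state n starts as the masked value, which is nonnegative, so it is carried as a Nat
def pvKernLoop (n : Nat) (count : Int) : Int :=
  if n ≠ 0 then pvKernLoop (n &&& (n - 1)) (count + 1) else count - 1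
termination_by n
decreasing_by
  have h : n &&& (n - 1) ≤ n - 1 := Nat.and_le_right
  omega

def poly_xor_cost_py_alt (poly : Int) (ORDER : Int) : Int :=
  pvKernLoop
    (if 0 < ORDER then PySem.Int.band poly (((1 <<< ORDER.toNat : Nat) : Int) - 1) else 0).toNat 0

-- ===== PRECONDITION & SPEC =====
def Spec_poly_xor_cost_py (poly : Int) (ORDER : Int) (out : Int) : Prop := out = poly_xor_cost_py_alt poly ORDER
instance (poly : Int) (ORDER : Int) (out : Int) : Decidable (Spec_poly_xor_cost_py poly ORDER out) := by unfold Spec_poly_xor_cost_py; infer_instance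

-- ===== CLAIM (what is proved, stated in full; the proofs are below) =====
def Claim_equal_poly_xor_cost_py : Prop := ∀ (poly : Int) (ORDER : Int), Dom_poly_xor_cost_py poly ORDER → Spec_poly_xor_cost_py poly ORDER (poly_xor_cost_py poly ORDER)

-- ===== LEMMAS AND PROOFS =====

-- reference bit count (binary recursion)
def pvPC (n : Nat) : Nat :=
  if n = 0 then 0 else n % 2 + pvPC (n / 2)
termination_by n
decreasing_by omega

lemma pvPC_unfold (n : Nat) : pvPC n = n % 2 + pvPC (n / 2) := by
  by_cases h : n = 0
  · subst h; simp [pvPC]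
  · rw [pvPC]; simp [h]

-- reference per-position count: A's loop body with its doubling mask, as a function of the fuel
def pvCM (poly mask : Int) (k : Nat) : Nat :=
  match k with
  | 0 => 0
  | k + 1 => (if PySem.Int.band poly mask ≠ 0 then 1 else 0) + pvCM poly (mask <<< (1 : Nat)) k

-- bit 0 of a Nat &&& / |||
lemma pvAndMod2 (a b : Nat) : (a &&& b) % 2 = (a % 2) &&& (b % 2) := by
  have h := Nat.testBit_and a b 0
  simp only [Nat.testBit_zero, ← Bool.decide_and, decide_eq_decide] at h
  rcases Nat.mod_two_eq_zero_or_one a with ha | ha <;>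
    rcases Nat.mod_two_eq_zero_or_one b with hb | hb <;>
      rw [ha, hb] <;>
      simp only [Nat.zero_and, Nat.and_zero, Nat.and_self] <;>
      omega

lemma pvOrMod2 (a b : Nat) : (a ||| b) % 2 = (a % 2) ||| (b % 2) := by
  have h := Nat.testBit_or a b 0
  simp only [Nat.testBit_zero, ← Bool.decide_or, decide_eq_decide] at h
  rcases Nat.mod_two_eq_zero_or_one a with ha | ha <;>
    rcases Nat.mod_two_eq_zero_or_one b with hb | hb <;>
      rw [ha, hb] <;>
      simp only [Nat.zero_or, Nat.or_zero, Nat.or_self] <;>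
      omega

-- halving identities on Nat
lemma pvN1 (x y : Nat) : x &&& (2 * y) = 2 * ((x / 2) &&& y) := by
  have hd : (x &&& (2 * y)) / 2 = (x / 2) &&& y := by
    rw [Nat.and_div_two]; congr 1; omega
  have hm : (x &&& (2 * y)) % 2 = 0 := by
    rw [pvAndMod2]
    have h : (2 * y) % 2 = 0 := by omega
    simp [h]
  omega

lemma pvN2 (x y : Nat) : x &&& (2 * y + 1) = 2 * ((x / 2) &&& y) + x % 2 := by
  have hd : (x &&& (2 * y + 1)) / 2 = (x / 2) &&& y := by
    rw [Nat.and_div_two]; congr 1; omega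
  have hm : (x &&& (2 * y + 1)) % 2 = x % 2 := by
    rw [pvAndMod2]
    have h1 : (2 * y + 1) % 2 = 1 := by omega
    rw [h1]
    rcases Nat.mod_two_eq_zero_or_one x with hx | hx <;> simp [hx]
  omega

lemma pvN3 (x y : Nat) : x ||| (2 * y + 1) = 2 * ((x / 2) ||| y) + 1 := by
  have hd : (x ||| (2 * y + 1)) / 2 = (x / 2) ||| y := by
    rw [Nat.or_div_two]; congr 1; omega
  have hm : (x ||| (2 * y + 1)) % 2 = 1 := by
    rw [pvOrMod2]
    have h1 : (2 * y + 1) % 2 = 1 := by omega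
    rw [h1]
    rcases Nat.mod_two_eq_zero_or_one x with hx | hx <;> simp [hx]
  omega

-- Python &: halving identity on Int (any signs)
lemma pvBandTwoMul (a m : Int) :
    PySem.Int.band a (2 * m) = 2 * PySem.Int.band (PySem.Int.floordiv a 2) m := by
  rw [PySem.Int.floordiv_eq_ediv_of_pos (by norm_num : (0:Int) < 2)]
  unfold PySem.Int.band
  by_cases ha : 0 ≤ a
  · have hfd : 0 ≤ a / 2 := by omega
    have htn : (a / 2).toNat = a.toNat / 2 := by omega
    by_cases hm : 0 ≤ m
    · have h2m : 0 ≤ 2 * m := by omega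
      simp only [ha, hm, h2m, hfd, if_pos]
      have h : (2 * m).toNat = 2 * m.toNat := by omega
      rw [h, htn, pvN1]
      push_cast; ring
    · have h2m : ¬ 0 ≤ 2 * m := by omega
      simp only [ha, hm, h2m, hfd, if_pos, if_neg, not_false_eq_true]
      have h : (-(2 * m) - 1).toNat = 2 * (-m - 1).toNat + 1 := by omega
      rw [h, htn]
      have hN2 := pvN2 a.toNat (-m - 1).toNat
      have hle : (a.toNat / 2) &&& (-m - 1).toNat ≤ a.toNat / 2 := Nat.and_le_left
      omega
  · have hfd : ¬ 0 ≤ a / 2 := by omega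
    have htn : (-(a / 2) - 1).toNat = (-a - 1).toNat / 2 := by omega
    by_cases hm : 0 ≤ m
    · have h2m : 0 ≤ 2 * m := by omega
      simp only [ha, hm, h2m, hfd, if_pos, if_neg, not_false_eq_true]
      have h : (2 * m).toNat = 2 * m.toNat := by omega
      rw [h, htn]
      have hc : (2 * m.toNat) &&& ((-a - 1).toNat) = 2 * (((-a - 1).toNat / 2) &&& m.toNat) := by
        rw [Nat.and_comm]; exact pvN1 ((-a - 1).toNat) m.toNat
      have hcomm : m.toNat &&& ((-a - 1).toNat / 2) = ((-a - 1).toNat / 2) &&& m.toNat :=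
        Nat.and_comm _ _
      have hle : ((-a - 1).toNat / 2) &&& m.toNat ≤ m.toNat := Nat.and_le_right
      omega
    · have h2m : ¬ 0 ≤ 2 * m := by omega
      simp only [ha, hm, h2m, hfd, if_neg, not_false_eq_true]
      have h : (-(2 * m) - 1).toNat = 2 * (-m - 1).toNat + 1 := by omega
      rw [h, htn]
      have hN3 := pvN3 ((-a - 1).toNat) ((-m - 1).toNat)
      omega

-- Python &: masking by (1 << k) - 1 is emod by 2^k (either sign of poly)
lemma pvBandMask (poly : Int) (k : Nat) :
    PySem.Int.band poly (((1 <<< k : Nat) : Int) - 1) = poly % ((2 : Int) ^ k) := by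
  rw [Nat.one_shiftLeft]
  have hk1 : (1 : Nat) ≤ 2 ^ k := Nat.one_le_two_pow
  have hpow : ((2 : Int) ^ k) = ((2 ^ k : Nat) : Int) := by push_cast; ring
  rw [hpow]
  have hmask : (0 : Int) ≤ ((2 ^ k : Nat) : Int) - 1 := by omega
  have ht : (((2 ^ k : Nat) : Int) - 1).toNat = 2 ^ k - 1 := by omega
  unfold PySem.Int.band
  by_cases hp : 0 ≤ poly
  · simp only [hp, hmask, if_pos]
    rw [ht, Nat.and_two_pow_sub_one_eq_mod]
    have hx : poly = ((poly.toNat : Nat) : Int) := by omega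
    rw [hx]
    norm_cast
  · obtain ⟨A, hpoly⟩ : ∃ A : Nat, poly = -(A : Int) - 1 := ⟨(-poly - 1).toNat, by omega⟩
    subst hpoly
    simp only [hp, hmask, if_pos, if_neg, not_false_eq_true]
    have hAt : (-(-(A : Int) - 1) - 1).toNat = A := by omega
    rw [hAt, ht]
    have hand : (2 ^ k - 1) &&& A = A % 2 ^ k := by
      rw [Nat.and_comm, Nat.and_two_pow_sub_one_eq_mod]
    rw [hand]
    have hNpos : (0 : Int) < ((2 ^ k : Nat) : Int) := by omega
    have hAm : ((A % 2 ^ k : Nat) : Int) = ((A : Nat) : Int) % ((2 ^ k : Nat) : Int) := by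
      norm_cast
    have hdm : ((2 ^ k : Nat) : Int) * (((A : Nat) : Int) / ((2 ^ k : Nat) : Int))
        + ((A : Nat) : Int) % ((2 ^ k : Nat) : Int) = ((A : Nat) : Int) :=
      Int.mul_ediv_add_emod _ _
    have h1 : 0 ≤ ((A : Nat) : Int) % ((2 ^ k : Nat) : Int) := Int.emod_nonneg _ (by omega)
    have h2 : ((A : Nat) : Int) % ((2 ^ k : Nat) : Int) < ((2 ^ k : Nat) : Int) :=
      Int.emod_lt_of_pos _ hNpos
    have he : -(A : Int) - 1 = (((2 ^ k : Nat) : Int) - 1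
          - ((A : Nat) : Int) % ((2 ^ k : Nat) : Int))
        + ((2 ^ k : Nat) : Int) * (-(((A : Nat) : Int) / ((2 ^ k : Nat) : Int)) - 1) := by
      linear_combination hdm
    have hmod : (-(A : Int) - 1) % ((2 ^ k : Nat) : Int) = ((2 ^ k : Nat) : Int) - 1
        - ((A : Nat) : Int) % ((2 ^ k : Nat) : Int) := by
      conv_lhs => rw [he]
      rw [Int.add_mul_emod_self_left]
      exact Int.emod_eq_of_lt (by omega) (by omega)
    rw [hmod]
    omega

-- A's loop computes pvCM
lemma pvALoop_eq_cm (k : Nat) : ∀ (poly ORDER mask set_bits current_bit : Int),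
    (ORDER - current_bit).toNat = k →
    pvALoop poly ORDER mask set_bits current_bit = set_bits + (pvCM poly mask k : Int) - 1 := by
  induction k with
  | zero =>
    intro poly ORDER mask sb cb hk
    have h : ¬ cb < ORDER := by omega
    rw [pvALoop, if_neg h]
    simp [pvCM]
  | succ k ih =>
    intro poly ORDER mask sb cb hk
    have h : cb < ORDER := by omega
    rw [pvALoop, if_pos h]
    rw [ih poly ORDER (mask <<< (1 : Nat))
      (if PySem.Int.band poly mask ≠ 0 then sb + 1 else sb) (cb + 1) (by omega)]
    simp only [pvCM]
    split_ifs <;> push_cast <;> ring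

-- a doubled mask descends into a halved poly
lemma pvCM_shift (k : Nat) : ∀ (poly mask : Int),
    pvCM poly (mask <<< (1 : Nat)) k = pvCM (PySem.Int.floordiv poly 2) mask k := by
  induction k with
  | zero => intro poly mask; simp [pvCM]
  | succ k ih =>
    intro poly mask
    simp only [pvCM]
    have hb : PySem.Int.band poly (mask <<< (1 : Nat))
        = 2 * PySem.Int.band (PySem.Int.floordiv poly 2) mask := by
      rw [show mask <<< (1 : Nat) = 2 * mask from by rw [Int.shiftLeft_eq]; ring]
      exact pvBandTwoMul poly mask
    have hiff : PySem.Int.band poly (mask <<< (1 : Nat)) ≠ 0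
        ↔ PySem.Int.band (PySem.Int.floordiv poly 2) mask ≠ 0 := by
      rw [hb]; omega
    rw [if_congr hiff rfl rfl, ih poly (mask <<< (1 : Nat))]

-- (p % 2^(k+1)) / 2 = (p / 2) % 2^k
lemma pvEmodSuccDiv2 (p : Int) (k : Nat) :
    (p % ((2 : Int) ^ (k + 1))) / 2 = (p / 2) % ((2 : Int) ^ k) := by
  have hneq : ((2 : Int) ^ (k + 1)) = 2 * (2 : Int) ^ k := by ring
  rw [hneq]
  have hNpos : (0 : Int) < (2 : Int) ^ k := by positivity
  have hdm := Int.mul_ediv_add_emod p (2 * (2 : Int) ^ k)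
  have hX0 : 0 ≤ p % (2 * (2 : Int) ^ k) := Int.emod_nonneg _ (by positivity)
  have hXlt : p % (2 * (2 : Int) ^ k) < 2 * (2 : Int) ^ k := Int.emod_lt_of_pos _ (by positivity)
  have hp2 : p / 2 = (p % (2 * (2 : Int) ^ k)) / 2
      + (2 : Int) ^ k * (p / (2 * (2 : Int) ^ k)) := by
    conv_lhs => rw [← hdm]
    rw [show (2 * (2 : Int) ^ k) * (p / (2 * (2 : Int) ^ k)) + p % (2 * (2 : Int) ^ k)
        = p % (2 * (2 : Int) ^ k) + 2 * ((2 : Int) ^ k * (p / (2 * (2 : Int) ^ k))) from by ring]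
    rw [Int.add_mul_ediv_left _ _ (by norm_num : (2 : Int) ≠ 0)]
  rw [hp2, Int.add_mul_emod_self_left]
  exact (Int.emod_eq_of_lt (by omega) (by omega)).symm

-- pvCM with mask 1 is the bit count of poly mod 2^k
lemma pvCM_eq_pc (k : Nat) : ∀ (poly : Int),
    pvCM poly 1 k = pvPC ((poly % ((2 : Int) ^ k)).toNat) := by
  induction k with
  | zero =>
    intro poly
    simp [pvCM, pow_zero, pvPC]
  | succ k ih =>
    intro poly
    have hstep : pvCM poly 1 (k + 1) =
        (if PySem.Int.band poly 1 ≠ 0 then 1 else 0)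
          + pvCM (PySem.Int.floordiv poly 2) 1 k := by
      simp only [pvCM]
      rw [pvCM_shift k poly 1]
    rw [hstep, ih]
    have hNpos : (0 : Int) < (2 : Int) ^ (k + 1) := by positivity
    have hX0 : 0 ≤ poly % (2 : Int) ^ (k + 1) := Int.emod_nonneg _ (by omega)
    have hfd : PySem.Int.floordiv poly 2 = poly / 2 :=
      PySem.Int.floordiv_eq_ediv_of_pos (by norm_num)
    have hdiv : (poly % (2 : Int) ^ (k + 1)) / 2 = (poly / 2) % (2 : Int) ^ k :=
      pvEmodSuccDiv2 poly k
    have h0 : 0 ≤ (poly / 2) % (2 : Int) ^ k := Int.emod_nonneg _ (by positivity)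
    have h2 : ((PySem.Int.floordiv poly 2) % (2 : Int) ^ k).toNat
        = (poly % (2 : Int) ^ (k + 1)).toNat / 2 := by
      rw [hfd]; omega
    have hdvd : (2 : Int) ∣ (2 : Int) ^ (k + 1) := Dvd.intro ((2 : Int) ^ k) (by ring)
    have hmm : (poly % (2 : Int) ^ (k + 1)) % 2 = poly % 2 := Int.emod_emod_of_dvd poly hdvd
    have h1 : (if PySem.Int.band poly 1 ≠ 0 then (1 : Nat) else 0)
        = (poly % (2 : Int) ^ (k + 1)).toNat % 2 := by
      rw [PySem.Int.band_one, PySem.Int.mod_eq_emod_of_pos (by norm_num : (0 : Int) < 2)]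
      split_ifs with h <;> omega
    rw [h1, h2, pvPC_unfold ((poly % (2 : Int) ^ (k + 1)).toNat)]

-- Kernighan's step removes one set bit
lemma pvKernStep (m : Nat) (hm : m ≠ 0) : pvPC (m &&& (m - 1)) + 1 = pvPC m := by
  induction m using Nat.strong_induction_on with
  | _ m ih =>
    rcases Nat.mod_two_eq_zero_or_one m with he | ho
    · -- even: m = 2q, q > 0
      have hq0 : m / 2 ≠ 0 := by omega
      have hm1 : m - 1 = 2 * (m / 2 - 1) + 1 := by omega
      have hand : m &&& (m - 1) = 2 * ((m / 2) &&& (m / 2 - 1)) := by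
        rw [hm1, pvN2]; omega
      have hpc2 : pvPC (2 * ((m / 2) &&& (m / 2 - 1))) = pvPC ((m / 2) &&& (m / 2 - 1)) := by
        rw [pvPC_unfold]
        have e1 : (2 * ((m / 2) &&& (m / 2 - 1))) % 2 = 0 := by omega
        have e2 : (2 * ((m / 2) &&& (m / 2 - 1))) / 2 = (m / 2) &&& (m / 2 - 1) := by omega
        rw [e1, e2]
        omega
      have hihq := ih (m / 2) (by omega) hq0
      have hpcm : pvPC m = pvPC (m / 2) := by
        rw [pvPC_unfold, he]
        omega
      rw [hand, hpc2, hihq, hpcm]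
    · -- odd: m = 2q + 1
      have hm1 : m - 1 = 2 * (m / 2) := by omega
      have hand : m &&& (m - 1) = 2 * (m / 2) := by
        rw [hm1, pvN1, Nat.and_self]
      have hpc2 : pvPC (2 * (m / 2)) = pvPC (m / 2) := by
        rw [pvPC_unfold]
        have e1 : (2 * (m / 2)) % 2 = 0 := by omega
        have e2 : (2 * (m / 2)) / 2 = m / 2 := by omega
        rw [e1, e2]
        omega
      have hpcm : pvPC m = 1 + pvPC (m / 2) := by
        rw [pvPC_unfold, ho]
      rw [hand, hpc2, hpcm]
      omega

-- B's loop computes the bit count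
lemma pvKernLoop_eq_pc (m : Nat) : ∀ (c : Int), pvKernLoop m c = c + (pvPC m : Int) - 1 := by
  induction m using Nat.strong_induction_on with
  | _ m ih =>
    intro c
    by_cases hm : m = 0
    · subst hm; rw [pvKernLoop]; simp [pvPC]
    · rw [pvKernLoop]
      simp only [hm, ne_eq, not_false_eq_true, if_pos]
      have hlt : m &&& (m - 1) < m := by
        have h : m &&& (m - 1) ≤ m - 1 := Nat.and_le_right
        omega
      rw [ih (m &&& (m - 1)) hlt (c + 1)]
      have := pvKernStep m hm
      omega

-- ===== VERDICT (by name: the statement is the Claim_ definition above) =====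
theorem poly_xor_cost_py_spec : Claim_equal_poly_xor_cost_py := by
  intro poly ORDER _
  unfold Spec_poly_xor_cost_py poly_xor_cost_py poly_xor_cost_py_alt
  rw [pvALoop_eq_cm (ORDER - 0).toNat poly ORDER 1 0 0 rfl]
  rw [show (ORDER - 0).toNat = ORDER.toNat from by omega]
  rw [pvCM_eq_pc]
  by_cases h : 0 < ORDER
  · rw [if_pos h, pvBandMask poly ORDER.toNat, pvKernLoop_eq_pc]
  · rw [if_neg h]
    rw [show ORDER.toNat = 0 from by omega]
    rw [pvKernLoop_eq_pc]
    simp [pvPC, pow_zero]
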